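-- pv_equiv track=rewrite | github.com/TraNhatDong/CSDL | CTDL_TRANHATDONG_N21DCCN111/Chuong2/BTH2_BAI9.py | trungCot
-- ===== SOURCE A (Python) =====
-- def trungCot(a):
--     c=0
--     d=0
--     for i in range(len(a)-1):
--         for j in range(len(a)):
--             if a[j][i]==a[j][i+1]:
--                 c+=1
--                 if c==len(a):
--                     d+=1
--                     c=0
--             else:
--                 c*=0
--     for j in range(len(a)):
--         if a[j][len(a)-1]==a[j][0]:
--             c += 1
--             if c == len(a):
--                 d+=1
--         else:
--             c*= 0
--     if d!=0:
--         return True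
--     else:
--         return False
-- ===== SOURCE B (Python) =====
-- def trungCot(a):
--     n = len(a)
--     cols = [[a[j][i] for j in range(n)] for i in range(n)]
--     if n == 0:
--         return False
--     return any(cols[i] == cols[i + 1] for i in range(n - 1)) or cols[n - 1] == cols[0]
-- ===== Notes on version B (the rewrite author's own statement) =====
-- stated objective: simpler
-- what changed: B materialises the columns once and compares adjacent (and wrap-around) columns as whole lists, instead of A's running consecutive-match counter threaded through nested loops.
-- intended difference: On square matrices where A's match counter, never reset between column pairs, accumulates n consecutive matches that straddle a column boundary although no adjacent (or wrap-around) pair of columns is fully equal, A returns True while B returns False; B's False is the intended answer since no two adjacent columns are equal. — e.g. on trungCot([[0, 1, 1], [0, 1, 1], [5, 5, 6]]): A returns true, B returns false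
import Mathlib
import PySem

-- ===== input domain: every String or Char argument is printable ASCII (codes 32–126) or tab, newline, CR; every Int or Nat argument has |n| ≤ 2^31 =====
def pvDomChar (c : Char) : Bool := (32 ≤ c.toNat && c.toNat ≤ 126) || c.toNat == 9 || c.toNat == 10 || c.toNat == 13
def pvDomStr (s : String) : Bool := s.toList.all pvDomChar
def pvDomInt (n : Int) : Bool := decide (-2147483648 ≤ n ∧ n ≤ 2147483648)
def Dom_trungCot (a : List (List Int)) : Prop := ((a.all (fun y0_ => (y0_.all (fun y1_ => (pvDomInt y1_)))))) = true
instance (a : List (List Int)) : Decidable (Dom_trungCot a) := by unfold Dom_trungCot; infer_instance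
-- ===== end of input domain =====

-- B replaces A's running consecutive-match counter by materialised columns compared as whole
-- lists (objective: simpler); on inputs in D_trungCot (counter run straddling a column
-- boundary) A wrongly returns True and B returns the intended False.

-- a[j][i] for in-range indices (Pre_trungCot guarantees in range; the default is never taken there)
def pvIdx (a : List (List Int)) (j i : Int) : Int :=
  PySem.List.pyGetD (PySem.List.pyGetD a j []) i 0

-- ===== PORT A =====
def trungCot (a : List (List Int)) : Bool :=
  let n : Int := a.length
  let s1 : Int × Int :=
    (PySem.List.pyRange 0 (n - 1) 1).foldl (fun cd i =>
      (PySem.List.pyRange 0 n 1).foldl (fun cd j =>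
        if pvIdx a j i = pvIdx a j (i + 1) then
          (if cd.1 + 1 = n then (0, cd.2 + 1) else (cd.1 + 1, cd.2))
        else (0, cd.2)) cd) (0, 0)
  let s2 : Int × Int :=
    (PySem.List.pyRange 0 n 1).foldl (fun cd j =>
      if pvIdx a j (n - 1) = pvIdx a j 0 then
        (if cd.1 + 1 = n then (cd.1 + 1, cd.2 + 1) else (cd.1 + 1, cd.2))
      else (0, cd.2)) s1
  decide (s2.2 ≠ 0)

-- ===== PORT B =====
def trungCot_alt (a : List (List Int)) : Bool :=
  let n : Int := a.length
  let cols : List (List Int) :=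
    (PySem.List.pyRange 0 n 1).map (fun i => (PySem.List.pyRange 0 n 1).map (fun j => pvIdx a j i))
  if n = 0 then false
  else
    ((PySem.List.pyRange 0 (n - 1) 1).any
        (fun i => decide (PySem.List.pyGetD cols i [] = PySem.List.pyGetD cols (i + 1) []))) ||
      decide (PySem.List.pyGetD cols (n - 1) [] = PySem.List.pyGetD cols 0 [])

-- ===== PRECONDITION & SPEC =====
-- Pre_: exactly the inputs where the Python A returns (every row at least len(a) long); on
-- shorter rows a[j][i] raises IndexError in both A and B.
def Pre_trungCot (a : List (List Int)) : Prop := ∀ row ∈ a, a.length ≤ row.length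
instance (a : List (List Int)) : Decidable (Pre_trungCot a) := by unfold Pre_trungCot; infer_instance

-- pvRow: entry in row j of column i (cyclically; in range throughout Pre_);
-- pvEqC: row j matches between column i and the cyclically next column
def pvRow (a : List (List Int)) (j i : Nat) : Int :=
  List.getD (a.getD j []) (i % a.length) 0

def pvEqC (a : List (List Int)) (i j : Nat) : Prop :=
  pvRow a j i = pvRow a j i.succ

def pvWitness_trungCot : List (List Int) := [[1, 2], [3, 4]]

-- D_: A's never-reset counter collects n consecutive matches straddling the boundary between
-- column pairs i and i+1 (rows above a cut matching for pair i, rows below it for pair i+1)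
-- although no adjacent (or wrap-around) column pair is fully equal: A returns True, B returns
-- the intended False since no two adjacent columns are equal.
def D_trungCot (a : List (List Int)) : Prop :=
  (∃ i < a.length - 1, ∃ m < a.length, ∀ j < a.length,
      pvEqC a (if m < j then i else i.succ) j) ∧
    ¬ ∃ i < a.length, ∀ j < a.length, pvEqC a i j
instance (a : List (List Int)) : Decidable (D_trungCot a) := by
  unfold D_trungCot pvEqC pvRow; infer_instance

def Spec_trungCot (a : List (List Int)) (out : Bool) : Prop := ¬ D_trungCot a → out = trungCot_alt a
instance (a : List (List Int)) (out : Bool) : Decidable (Spec_trungCot a out) := by unfold Spec_trungCot; infer_instance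

def pvDiffWitness_trungCot : List (List Int) := [[0, 1, 1], [0, 1, 1], [5, 5, 6]]
def pvDiffWitnessOut_trungCot : Bool × Bool := (true, false)

-- ===== CLAIM (what is proved, stated in full; the proofs are below) =====
def Claim_unchanged_trungCot : Prop := ∀ (a : List (List Int)), Dom_trungCot a → Pre_trungCot a → Spec_trungCot a (trungCot a)
def Claim_changed_trungCot : Prop := Dom_trungCot (pvDiffWitness_trungCot) ∧ Pre_trungCot (pvDiffWitness_trungCot) ∧ D_trungCot (pvDiffWitness_trungCot) ∧ trungCot (pvDiffWitness_trungCot) = pvDiffWitnessOut_trungCot.1 ∧ trungCot_alt (pvDiffWitness_trungCot) = pvDiffWitnessOut_trungCot.2 ∧ pvDiffWitnessOut_trungCot.1 ≠ pvDiffWitnessOut_trungCot.2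
def Claim_exact_trungCot : Prop := ∀ (a : List (List Int)), Dom_trungCot a → Pre_trungCot a → D_trungCot a → trungCot a ≠ trungCot_alt a

-- ===== LEMMAS AND PROOFS =====

-- step of A's first double loop (reset to 0 on reaching n) and of the wrap loop (no reset)
def pvStep1 (n : Int) (cd : Int × Int) (b : Bool) : Int × Int :=
  if b then (if cd.1 + 1 = n then (0, cd.2 + 1) else (cd.1 + 1, cd.2)) else (0, cd.2)
def pvStep2 (n : Int) (cd : Int × Int) (b : Bool) : Int × Int :=
  if b then (if cd.1 + 1 = n then (cd.1 + 1, cd.2 + 1) else (cd.1 + 1, cd.2)) else (0, cd.2)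

-- comparison of column i with column (i+1) mod n at row j
def pvCmp (a : List (List Int)) (i j : Nat) : Bool :=
  decide (pvIdx a (j : Int) (i : Int) = pvIdx a (j : Int) (((i + 1) % a.length : Nat) : Int))

-- A's scan order of those comparisons: pair index i outermost, row j innermost
def pvStream (a : List (List Int)) : List Bool :=
  (List.range a.length).flatMap (fun i => (List.range a.length).map (fun j => pvCmp a i j))

-- trailing-run counter
def pvG (c : Int) (l : List Bool) : Int := l.foldl (fun c b => if b then c + 1 else 0) c

-- l contains a block of n consecutive `true`s
def pvRun (n : Nat) (l : List Bool) : Prop := ∃ p s : List Bool, l = p ++ List.replicate n true ++ s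

theorem pvG_append (c : Int) (l₁ l₂ : List Bool) : pvG c (l₁ ++ l₂) = pvG (pvG c l₁) l₂ := by
  simp [pvG, List.foldl_append]

theorem pvG_replicate_true (c : Int) (m : Nat) : pvG c (List.replicate m true) = c + m := by
  induction m generalizing c with
  | zero => simp [pvG]
  | succ m ih =>
    simp only [List.replicate_succ, pvG, List.foldl_cons, if_true] at *
    rw [ih]; push_cast; ring

theorem pvG_nonneg (c : Int) (l : List Bool) (h : 0 ≤ c) : 0 ≤ pvG c l := by
  induction l generalizing c with
  | nil => simpa [pvG]
  | cons b l ih =>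
    have h1 : pvG c (b :: l) = pvG (if b then c + 1 else 0) l := by cases b <;> simp [pvG]
    rw [h1]
    exact ih _ (by split <;> omega)

-- if the trailing counter is at least m, l ends in m trues
theorem pvG_trail (l : List Bool) (m : Nat) (h : (m : Int) ≤ pvG 0 l) :
    ∃ p, l = p ++ List.replicate m true := by
  induction l using List.reverseRecOn generalizing m with
  | nil =>
    have : m = 0 := by simp [pvG] at h; omega
    exact ⟨[], by simp [this]⟩
  | append_singleton l b ih =>
    cases b with
    | false =>
      have : pvG 0 (l ++ [false]) = 0 := by simp [pvG]
      have hm : m = 0 := by omega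
      exact ⟨l ++ [false], by simp [hm]⟩
    | true =>
      have hg : pvG 0 (l ++ [true]) = pvG 0 l + 1 := by simp [pvG]
      cases m with
      | zero => exact ⟨l ++ [true], by simp⟩
      | succ m =>
        obtain ⟨p, hp⟩ := ih m (by omega)
        exact ⟨p, by rw [hp, List.replicate_succ' ]; simp⟩

theorem pvG_of_trail (p : List Bool) (m : Nat) :
    (m : Int) ≤ pvG 0 (p ++ List.replicate m true) := by
  rw [pvG_append, pvG_replicate_true]
  have := pvG_nonneg 0 p (le_refl 0)
  omega

theorem pvRun_append_singleton (n : Nat) (hn : 1 ≤ n) (l : List Bool) (b : Bool) :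
    pvRun n (l ++ [b]) ↔ pvRun n l ∨ (b = true ∧ ((n : Int) - 1) ≤ pvG 0 l) := by
  constructor
  · rintro ⟨p, s, hps⟩
    rcases s.eq_nil_or_concat with rfl | ⟨s', x, rfl⟩
    · -- l ++ [b] = p ++ replicate n true
      obtain ⟨m, rfl⟩ : ∃ m, n = m + 1 := ⟨n - 1, by omega⟩
      rw [List.replicate_succ'] at hps
      simp only [List.append_nil, ← List.append_assoc] at hps
      have h2 := List.append_inj' hps (by simp)
      obtain ⟨hl, hb⟩ := h2
      right
      refine ⟨by simpa using hb.symm, ?_⟩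
      have := pvG_of_trail p m
      rw [← hl] at this
      push_cast at this ⊢
      omega
    · left
      simp only [List.concat_eq_append, ← List.append_assoc] at hps
      have h2 := List.append_inj' hps (by simp)
      exact ⟨p, s', by rw [h2.1]⟩
  · rintro (⟨p, s, rfl⟩ | ⟨rfl, hg⟩)
    · exact ⟨p, s ++ [b], by simp⟩
    · obtain ⟨m, rfl⟩ : ∃ m, n = m + 1 := ⟨n - 1, by omega⟩
      obtain ⟨p, hp⟩ := pvG_trail l m (by push_cast at hg ⊢; omega)
      exact ⟨p, [], by rw [hp, List.replicate_succ']; simp⟩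

theorem pvStep2_c (n c d : Int) (l : List Bool) :
    (l.foldl (pvStep2 n) (c, d)).1 = pvG c l := by
  induction l generalizing c d with
  | nil => simp [pvG]
  | cons b l ih =>
    cases b with
    | false =>
      simp only [List.foldl_cons, pvStep2, Bool.false_eq_true, if_false]
      rw [ih]; simp [pvG]
    | true =>
      simp only [List.foldl_cons, pvStep2, if_true]
      have hg : pvG c (true :: l) = pvG (c + 1) l := by simp [pvG]
      rw [hg]; split <;> exact ih _ _

theorem pvStep2_d_nonneg (n c d : Int) (l : List Bool) (h : 0 ≤ d) :
    0 ≤ (l.foldl (pvStep2 n) (c, d)).2 := by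
  induction l generalizing c d with
  | nil => simpa
  | cons b l ih =>
    cases b with
    | false => exact ih _ _ h
    | true =>
      simp only [List.foldl_cons, pvStep2, if_true]
      split <;> exact ih _ _ (by omega)

-- characterisation of the wrap-style counter: d becomes nonzero iff a run of n trues exists
theorem pvStep2_char (n : Nat) (hn : 1 ≤ n) (l : List Bool) :
    (l.foldl (pvStep2 (n : Int)) (0, 0)).2 ≠ 0 ↔ pvRun n l := by
  induction l using List.reverseRecOn with
  | nil =>
    simp only [List.foldl_nil, ne_eq, not_true_eq_false]
    constructor
    · intro h; exact h.elim
    · rintro ⟨p, s, hps⟩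
      have := congrArg List.length hps
      simp at this
      omega
  | append_singleton l b ih =>
    rw [List.foldl_append, pvRun_append_singleton n hn]
    have hc : (l.foldl (pvStep2 (n : Int)) (0, 0)).1 = pvG 0 l := pvStep2_c n 0 0 l
    have hd : 0 ≤ (l.foldl (pvStep2 (n : Int)) (0, 0)).2 := pvStep2_d_nonneg n 0 0 l (le_refl 0)
    cases b with
    | false =>
      simp only [List.foldl_cons, List.foldl_nil, pvStep2, Bool.false_eq_true, if_false]
      simpa using ih
    | true =>
      simp only [List.foldl_cons, List.foldl_nil, pvStep2, if_true]
      by_cases h : (l.foldl (pvStep2 (n : Int)) (0, 0)).1 + 1 = (n : Int)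
      · rw [if_pos h]
        simp only [ne_eq]
        constructor
        · intro _; right; exact ⟨by simp, by omega⟩
        · intro _; omega
      · rw [if_neg h]
        rw [ih]
        constructor
        · intro hr; left; exact hr
        · rintro (hr | ⟨_, hg⟩)
          · exact hr
          · -- counter ≥ n, so l itself ends in n trues: a run already in l
            have hge : (n : Int) ≤ pvG 0 l := by omega
            obtain ⟨p, hp⟩ := pvG_trail l n hge
            exact ⟨p, [], by rw [hp]; simp⟩

-- relation between the two counter machines: equal states while d = 0, both nonzero afterwards
def pvRel (s1 s2 : Int × Int) : Prop :=
  0 ≤ s1.2 ∧ 0 ≤ s2.2 ∧ ((s1.2 = 0 ∧ s2.2 = 0 ∧ s1.1 = s2.1) ∨ (s1.2 ≠ 0 ∧ s2.2 ≠ 0))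

theorem pvRel_step12 (n : Int) (s1 s2 : Int × Int) (b : Bool) (h : pvRel s1 s2) :
    pvRel (pvStep1 n s1 b) (pvStep2 n s2 b) := by
  obtain ⟨c1, d1⟩ := s1
  obtain ⟨c2, d2⟩ := s2
  obtain ⟨h1, h2, hc⟩ := h
  dsimp only at h1 h2
  cases b with
  | false =>
    simp only [pvStep1, pvStep2, Bool.false_eq_true, if_false]
    exact ⟨h1, h2, by
      rcases hc with ⟨e1, e2, ec⟩ | ⟨n1, n2⟩
      · exact Or.inl ⟨e1, e2, rfl⟩
      · exact Or.inr ⟨n1, n2⟩⟩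
  | true =>
    simp only [pvStep1, pvStep2, if_true]
    rcases hc with ⟨e1, e2, ec⟩ | ⟨n1, n2⟩
    · dsimp only at e1 e2 ec
      subst e1; subst e2; rw [ec]
      unfold pvRel
      split_ifs <;> dsimp only <;> omega
    · dsimp only at n1 n2
      unfold pvRel
      split_ifs <;> dsimp only <;> omega

theorem pvRel_step22 (n : Int) (s1 s2 : Int × Int) (b : Bool) (h : pvRel s1 s2) :
    pvRel (pvStep2 n s1 b) (pvStep2 n s2 b) := by
  obtain ⟨c1, d1⟩ := s1
  obtain ⟨c2, d2⟩ := s2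
  obtain ⟨h1, h2, hc⟩ := h
  dsimp only at h1 h2
  cases b with
  | false =>
    simp only [pvStep2, Bool.false_eq_true, if_false]
    exact ⟨h1, h2, by
      rcases hc with ⟨e1, e2, ec⟩ | ⟨n1, n2⟩
      · exact Or.inl ⟨e1, e2, rfl⟩
      · exact Or.inr ⟨n1, n2⟩⟩
  | true =>
    simp only [pvStep2, if_true]
    rcases hc with ⟨e1, e2, ec⟩ | ⟨n1, n2⟩
    · dsimp only at e1 e2 ec
      subst e1; subst e2; rw [ec]
      unfold pvRel
      split_ifs <;> dsimp only <;> omega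
    · dsimp only at n1 n2
      unfold pvRel
      split_ifs <;> dsimp only <;> omega

theorem pvRel_fold (_n : Int) (step1 step2 : (Int × Int) → Bool → (Int × Int))
    (hstep : ∀ s1 s2 b, pvRel s1 s2 → pvRel (step1 s1 b) (step2 s2 b)) :
    ∀ (l : List Bool) (s1 s2 : Int × Int), pvRel s1 s2 →
      pvRel (l.foldl step1 s1) (l.foldl step2 s2) := by
  intro l
  induction l with
  | nil => intro s1 s2 h; exact h
  | cons b l ih => intro s1 s2 h; exact ih _ _ (hstep _ _ _ h)

-- mixed fold (step1 then step2) has nonzero d iff the pure step2 fold does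
theorem pvMixed_char (n : Int) (l₁ l₂ : List Bool) :
    ((l₂.foldl (pvStep2 n) (l₁.foldl (pvStep1 n) (0, 0))).2 ≠ 0) ↔
      (((l₁ ++ l₂).foldl (pvStep2 n) (0, 0)).2 ≠ 0) := by
  rw [List.foldl_append]
  have h0 : pvRel (0, 0) (0, 0) := by simp [pvRel]
  have h1 := pvRel_fold n _ _ (pvRel_step12 n) l₁ _ _ h0
  have h2 := pvRel_fold n _ _ (pvRel_step22 n) l₂ _ _ h1
  obtain ⟨_, _, ⟨e1, e2, _⟩ | ⟨ne1, ne2⟩⟩ := h2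
  · rw [e1, e2]
  · constructor <;> intro _ <;> assumption

theorem pvFoldl_flatMap {α β σ : Type} (g : α → List β) (f : σ → β → σ) :
    ∀ (l : List α) (init : σ),
      l.foldl (fun s x => (g x).foldl f s) init = (l.flatMap g).foldl f init := by
  intro l
  induction l with
  | nil => intro init; rfl
  | cons x l ih => intro init; simp [List.flatMap_cons, List.foldl_append, ih]

-- the comparison streams of A's two loop nests
def pvF1 (a : List (List Int)) : List Bool :=
  (List.range (a.length - 1)).flatMap (fun (i : Nat) =>
    (List.range a.length).map (fun (j : Nat) =>
      decide (pvIdx a (j : Int) (i : Int) = pvIdx a (j : Int) ((i : Int) + 1))))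
def pvF2 (a : List (List Int)) : List Bool :=
  (List.range a.length).map (fun (j : Nat) =>
    decide (pvIdx a (j : Int) ((a.length : Int) - 1) = pvIdx a (j : Int) 0))

theorem pvFoldl_congr {α σ : Type} (l : List α) (f g : σ → α → σ) (init : σ)
    (h : ∀ (s : σ) (x : α), x ∈ l → f s x = g s x) : l.foldl f init = l.foldl g init := by
  induction l generalizing init with
  | nil => rfl
  | cons x l ih =>
    simp only [List.foldl_cons]
    rw [h init x (by simp)]
    exact ih _ (fun s y hy => h s y (by simp [hy]))

theorem pvRange_fold_step1 (a : List (List Int)) (i : Int) (cd : Int × Int) :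
    (PySem.List.pyRange 0 (a.length : Int) 1).foldl (fun cd j =>
        if pvIdx a j i = pvIdx a j (i + 1) then
          (if cd.1 + 1 = (a.length : Int) then (0, cd.2 + 1) else (cd.1 + 1, cd.2))
        else (0, cd.2)) cd
      = ((List.range a.length).map (fun (j : Nat) =>
          decide (pvIdx a (j : Int) i = pvIdx a (j : Int) (i + 1)))).foldl
          (pvStep1 (a.length : Int)) cd := by
  rw [PySem.List.pyRange_one]
  have hn : ((a.length : Int) - 0).toNat = a.length := by omega
  rw [hn]
  simp only [List.foldl_map]
  apply pvFoldl_congr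
  intro cd j _
  by_cases h : pvIdx a (j : Int) i = pvIdx a (j : Int) (i + 1) <;>
    simp [pvStep1, h]

theorem trungCot_eq_fold (a : List (List Int)) :
    trungCot a = decide
      (((pvF2 a).foldl (pvStep2 (a.length : Int))
          ((pvF1 a).foldl (pvStep1 (a.length : Int)) (0, 0))).2 ≠ 0) := by
  simp only [trungCot]
  congr 1
  -- rewrite the wrap loop
  have h2 : ∀ s : Int × Int,
      (PySem.List.pyRange 0 (a.length : Int) 1).foldl (fun cd j =>
          if pvIdx a j ((a.length : Int) - 1) = pvIdx a j 0 then
            (if cd.1 + 1 = (a.length : Int) then (cd.1 + 1, cd.2 + 1) else (cd.1 + 1, cd.2))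
          else (0, cd.2)) s
        = (pvF2 a).foldl (pvStep2 (a.length : Int)) s := by
    intro s
    rw [PySem.List.pyRange_one]
    have hn : ((a.length : Int) - 0).toNat = a.length := by omega
    rw [hn, pvF2]
    simp only [List.foldl_map]
    apply pvFoldl_congr
    intro cd j _
    by_cases h : pvIdx a (j : Int) ((a.length : Int) - 1) = pvIdx a (j : Int) 0 <;>
      simp [pvStep2, h]
  rw [h2]
  congr 1
  -- rewrite the double loop
  have h1 :
      (PySem.List.pyRange 0 ((a.length : Int) - 1) 1).foldl (fun cd i =>
          (PySem.List.pyRange 0 (a.length : Int) 1).foldl (fun cd j =>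
            if pvIdx a j i = pvIdx a j (i + 1) then
              (if cd.1 + 1 = (a.length : Int) then (0, cd.2 + 1) else (cd.1 + 1, cd.2))
            else (0, cd.2)) cd) ((0 : Int), (0 : Int))
        = (List.range (a.length - 1)).foldl (fun (cd : Int × Int) (i : Nat) =>
            ((List.range a.length).map (fun (j : Nat) =>
              decide (pvIdx a (j : Int) (i : Int) = pvIdx a (j : Int) ((i : Int) + 1)))).foldl
              (pvStep1 (a.length : Int)) cd) (0, 0) := by
    rw [PySem.List.pyRange_one 0 ((a.length : Int) - 1)]
    have hn : (((a.length : Int) - 1) - 0).toNat = a.length - 1 := by omega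
    rw [hn]
    simp only [List.foldl_map]
    apply pvFoldl_congr
    intro cd i _
    rw [pvRange_fold_step1]
    simp [List.foldl_map]
  rw [h1, pvF1, ← pvFoldl_flatMap]

theorem pvFlatMap_congr {α β : Type} (l : List α) (f g : α → List β)
    (h : ∀ x ∈ l, f x = g x) : l.flatMap f = l.flatMap g := by
  induction l with
  | nil => rfl
  | cons x l ih =>
    simp only [List.flatMap_cons]
    rw [h x (by simp), ih (fun y hy => h y (by simp [hy]))]

-- pvF1 ++ pvF2 is exactly the scan order pvStream
theorem pvStream_eq (a : List (List Int)) (h : 1 ≤ a.length) :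
    pvF1 a ++ pvF2 a = pvStream a := by
  have hsplit : List.range a.length = List.range (a.length - 1) ++ [a.length - 1] := by
    conv_lhs => rw [show a.length = (a.length - 1) + 1 by omega]
    rw [List.range_succ]
  unfold pvStream
  set B := fun i => (List.range a.length).map (fun j => pvCmp a i j) with hB
  rw [hsplit, List.flatMap_append]
  congr 1
  · unfold pvF1
    apply pvFlatMap_congr
    intro i hi
    have hilt : i < a.length - 1 := List.mem_range.mp hi
    rw [hB]
    apply List.map_congr_left
    intro j _
    unfold pvCmp
    rw [Nat.mod_eq_of_lt (by omega)]
    norm_cast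
  · unfold pvF2
    simp only [List.flatMap_cons, List.flatMap_nil, List.append_nil, hB]
    apply List.map_congr_left
    intro j _
    unfold pvCmp
    rw [Nat.sub_add_cancel h, Nat.mod_self]
    have hc : ((a.length - 1 : Nat) : Int) = (a.length : Int) - 1 := by omega
    rw [hc]; norm_num

theorem trungCot_char (a : List (List Int)) (h : 1 ≤ a.length) :
    trungCot a = true ↔ pvRun a.length (pvStream a) := by
  rw [trungCot_eq_fold, decide_eq_true_iff, pvMixed_char, pvStream_eq a h,
    pvStep2_char a.length h]

theorem pvStream_length (a : List (List Int)) :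
    (pvStream a).length = a.length * a.length := by
  simp [pvStream, List.length_flatMap, List.map_const', List.sum_replicate, smul_eq_mul]

-- run existence in index form (as in D_trungCot) agrees with the structural form
theorem pvIndexRun_iff (n : Nat) (l : List Bool) (hn : 1 ≤ n) (hl : l.length = n * n) :
    (∃ k < n * n, k + n ≤ n * n ∧ ∀ t < n, l.getD (k + t) false = true) ↔ pvRun n l := by
  constructor
  · rintro ⟨k, hk, hkn, hall⟩
    refine ⟨l.take k, (l.drop k).drop n, ?_⟩
    have hmid : (l.drop k).take n = List.replicate n true := by
      refine List.eq_replicate_iff.mpr ⟨?_, ?_⟩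
      · simp only [List.length_take, List.length_drop, hl]
        omega
      · intro b hb
        obtain ⟨t, ht, hbt⟩ := List.mem_iff_getElem.mp hb
        have htn : t < n := by
          have := ht
          simp only [List.length_take, List.length_drop, hl] at this
          omega
        have hidx : k + t < l.length := by omega
        have hval := hall t htn
        rw [List.getD_eq_getElem?_getD, List.getElem?_eq_getElem hidx] at hval
        simp only [Option.getD_some] at hval
        rw [List.getElem_take, List.getElem_drop] at hbt
        rw [← hbt, hval]
    have hdecomp : l = List.take k l ++ (List.take n (List.drop k l) ++ List.drop n (List.drop k l)) := by
      rw [List.take_append_drop, List.take_append_drop]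
    conv_lhs => rw [hdecomp, hmid]
    rw [List.append_assoc]
  · rintro ⟨p, s, rfl⟩
    have hlen : p.length + (n + s.length) = n * n := by
      have := hl
      simpa using this
    refine ⟨p.length, by omega, by omega, ?_⟩
    intro t ht
    rw [List.append_assoc, List.getD_eq_getElem?_getD, List.getElem?_append_right (by omega)]
    have h2 : p.length + t - p.length = t := by omega
    rw [h2, List.getElem?_append_left (by simpa using ht), List.getElem?_replicate, if_pos ht]
    rfl

theorem pvFlatMap_getElem? {α β : Type} (n : Nat) :
    ∀ (l : List α) (g : α → List β), (∀ x ∈ l, (g x).length = n) →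
      ∀ (k t : Nat), (hk : k < l.length) → t < n →
        (l.flatMap g)[k * n + t]? = (g l[k])[t]? := by
  intro l
  induction l with
  | nil => intro g _ k t hk _; simp at hk
  | cons x l ih =>
    intro g hg k t hk ht
    cases k with
    | zero =>
      simp only [List.flatMap_cons, Nat.zero_mul, Nat.zero_add]
      rw [List.getElem?_append_left (by rw [hg x (by simp)]; omega)]
      simp
    | succ k =>
      simp only [List.flatMap_cons]
      have harith : (k + 1) * n + t = (g x).length + (k * n + t) := by
        rw [hg x (by simp)]; ring
      rw [harith, List.getElem?_append_right (by omega)]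
      have : (g x).length + (k * n + t) - (g x).length = k * n + t := by omega
      rw [this]
      have := ih g (fun y hy => hg y (by simp [hy])) k t (by simpa using hk) ht
      simpa using this

-- an equal adjacent pair of columns gives an aligned run in the stream
theorem pvAdj_indexRun (a : List (List Int)) (i : Nat) (hi : i < a.length)
    (hall : ∀ j < a.length, pvCmp a i j = true) :
    ∃ k < a.length * a.length, k + a.length ≤ a.length * a.length ∧
      ∀ t < a.length, (pvStream a).getD (k + t) false = true := by
  have hn1 : 1 ≤ a.length := by omega
  have hmul : (i + 1) * a.length ≤ a.length * a.length :=
    Nat.mul_le_mul_right _ (by omega)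
  have harith : i * a.length + a.length = (i + 1) * a.length := by ring
  refine ⟨i * a.length, by omega, by omega, ?_⟩
  · intro t ht
    unfold pvStream
    rw [List.getD_eq_getElem?_getD,
      pvFlatMap_getElem? a.length (List.range a.length) _
        (fun x _ => by simp) i t (by simpa using hi) ht]
    rw [List.getElem_range]
    simp [ht, hall t ht]

theorem pvEqC_iff (a : List (List Int)) (i j : Nat) (hi : i < a.length) :
    pvEqC a i j ↔ pvCmp a i j = true := by
  simp only [pvEqC, pvRow, pvCmp, pvIdx, PySem.List.pyGetD_natCast, decide_eq_true_iff,
    Nat.succ_eq_add_one, Nat.mod_eq_of_lt hi]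

theorem pvStream_getD (a : List (List Int)) (p : Nat) (hp : p < a.length * a.length) :
    (pvStream a).getD p false = pvCmp a (p / a.length) (p % a.length) := by
  have hn : 1 ≤ a.length := by
    by_contra hc
    rw [show a.length = 0 by omega] at hp
    omega
  obtain ⟨k, t, rfl, hk, ht⟩ :
      ∃ k t, p = k * a.length + t ∧ k < a.length ∧ t < a.length :=
    ⟨p / a.length, p % a.length,
      by conv_lhs => rw [← Nat.div_add_mod p a.length]
         rw [Nat.mul_comm],
      Nat.div_lt_of_lt_mul hp, Nat.mod_lt p (by omega)⟩
  have e1 : (k * a.length + t) / a.length = k := by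
    rw [Nat.mul_comm, Nat.mul_add_div (by omega), Nat.div_eq_of_lt ht]
    omega
  have e2 : (k * a.length + t) % a.length = t := by
    rw [Nat.mul_comm, Nat.mul_add_mod, Nat.mod_eq_of_lt ht]
  rw [e1, e2]
  unfold pvStream
  rw [List.getD_eq_getElem?_getD,
    pvFlatMap_getElem? a.length (List.range a.length) _ (fun x _ => by simp)
      k t (by simpa using hk) ht, List.getElem_range]
  simp [ht]

theorem pvQR (n q r : Nat) (hn : 1 ≤ n) (hr : r < n) :
    (q * n + r) / n = q ∧ (q * n + r) % n = r := by
  constructor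
  · rw [Nat.mul_comm, Nat.mul_add_div (by omega), Nat.div_eq_of_lt hr]
    omega
  · rw [Nat.mul_comm, Nat.mul_add_mod, Nat.mod_eq_of_lt hr]

-- D_trungCot in terms of the stream and pvCmp: a run of n consecutive matches in the scan,
-- and no fully equal adjacent column pair
theorem pvD_iff (a : List (List Int)) :
    D_trungCot a ↔
      ((∃ k < a.length * a.length, k + a.length ≤ a.length * a.length ∧
          ∀ t < a.length, (pvStream a).getD (k + t) false = true) ∧
        ¬ (∃ i < a.length, ∀ j < a.length, pvCmp a i j = true)) := by
  unfold D_trungCot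
  have hadj_iff : (∃ i < a.length, ∀ j < a.length, pvEqC a i j) ↔
      (∃ i < a.length, ∀ j < a.length, pvCmp a i j = true) := by
    constructor
    · rintro ⟨i, hi, hj⟩
      exact ⟨i, hi, fun j hjn => (pvEqC_iff a i j hi).mp (hj j hjn)⟩
    · rintro ⟨i, hi, hj⟩
      exact ⟨i, hi, fun j hjn => (pvEqC_iff a i j hi).mpr (hj j hjn)⟩
  constructor
  · rintro ⟨⟨i, hi, m, hm, hall⟩, hadjE⟩
    refine ⟨?_, fun h => hadjE (hadj_iff.mpr h)⟩
    have hn : 1 ≤ a.length := by omega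
    set n := a.length with hndef
    have hnn : n * n = a.length * a.length := by rw [hndef]
    have hle : (i + 2) * n ≤ n * n := Nat.mul_le_mul_right _ (by omega)
    have ha1 : (i + 2) * n = i * n + n + n := by ring
    have ha2 : (i + 1) * n = i * n + n := by ring
    refine ⟨i * n + (m + 1), by omega, by omega, ?_⟩
    intro t ht
    rw [pvStream_getD a _ (by omega)]
    by_cases hcase : m + 1 + t < n
    · have harr : i * n + (m + 1) + t = i * n + (m + 1 + t) := by omega
      rw [harr, (pvQR n i (m + 1 + t) hn hcase).1, (pvQR n i (m + 1 + t) hn hcase).2]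
      refine (pvEqC_iff a i (m + 1 + t) (by omega)).mp ?_
      have := hall (m + 1 + t) hcase
      rw [if_pos (by omega)] at this
      exact this
    · have hj : m + 1 + t - n < n := by omega
      have harr : i * n + (m + 1) + t = (i + 1) * n + (m + 1 + t - n) := by
        rw [ha2]; omega
      rw [harr, (pvQR n (i + 1) (m + 1 + t - n) hn hj).1,
        (pvQR n (i + 1) (m + 1 + t - n) hn hj).2]
      refine (pvEqC_iff a (i + 1) (m + 1 + t - n) (by omega)).mp ?_
      have := hall (m + 1 + t - n) (by omega)
      rw [if_neg (by omega)] at this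
      exact this
  · rintro ⟨⟨k, hk, hkn, hall⟩, hadjC⟩
    have hadj : ¬ ∃ i < a.length, ∀ j < a.length, pvEqC a i j :=
      fun h => hadjC (hadj_iff.mp h)
    refine ⟨?_, hadj⟩
    have hn : 1 ≤ a.length := by
      by_contra hc
      rw [show a.length = 0 by omega] at hk
      omega
    set n := a.length with hndef
    have hnn : n * n = a.length * a.length := by rw [hndef]
    have hdm : n * (k / n) + k % n = k := Nat.div_add_mod k n
    have hm0 : k % n < n := Nat.mod_lt k (by omega)
    have hget : ∀ t < n, pvCmp a ((k + t) / n) ((k + t) % n) = true := by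
      intro t ht
      rw [← pvStream_getD a (k + t) (by omega)]
      exact hall t ht
    by_cases hal : k % n = 0
    · exfalso
      apply hadj
      have hklt : k / n < n := Nat.div_lt_of_lt_mul hk
      refine ⟨k / n, hklt, ?_⟩
      intro j hj
      have harr : k + j = (k / n) * n + j := by rw [Nat.mul_comm]; omega
      have := hget j hj
      rw [harr, (pvQR n (k / n) j hn hj).1, (pvQR n (k / n) j hn hj).2] at this
      exact (pvEqC_iff a (k / n) j (by omega)).mpr this
    · have hi1 : (k / n + 1) * n < n * n := by
        have : (k / n + 1) * n = n * (k / n) + n := by ring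
        omega
      have hilt : k / n + 1 < n := Nat.lt_of_mul_lt_mul_right hi1
      refine ⟨k / n, by omega, k % n - 1, by omega, ?_⟩
      intro j hj
      by_cases hcut : k % n - 1 < j
      · rw [if_pos hcut]
        have ht : j - k % n < n := by omega
        have harr : k + (j - k % n) = (k / n) * n + j := by rw [Nat.mul_comm]; omega
        have := hget (j - k % n) ht
        rw [harr, (pvQR n (k / n) j hn hj).1, (pvQR n (k / n) j hn hj).2] at this
        exact (pvEqC_iff a (k / n) j (by omega)).mpr this
      · rw [if_neg hcut]
        have ht : n - k % n + j < n := by omega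
        have harr : k + (n - k % n + j) = (k / n + 1) * n + j := by
          have : (k / n + 1) * n = n * (k / n) + n := by ring
          omega
        have := hget (n - k % n + j) ht
        rw [harr, (pvQR n (k / n + 1) j hn hj).1, (pvQR n (k / n + 1) j hn hj).2] at this
        have hs : (k / n).succ = k / n + 1 := rfl
        rw [hs]
        exact (pvEqC_iff a (k / n + 1) j (by omega)).mpr this

theorem trungCot_alt_char (a : List (List Int)) :
    trungCot_alt a = true ↔ ∃ i < a.length, ∀ j < a.length, pvCmp a i j = true := by
  rcases Nat.eq_zero_or_pos a.length with h0 | h1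
  · simp [trungCot_alt, h0]
  · have hN : ((a.length : Int)) ≠ 0 := by omega
    simp only [trungCot_alt, if_neg hN]
    have hcol : ∀ i : Int, 0 ≤ i → i < (a.length : Int) →
        PySem.List.pyGetD
            ((PySem.List.pyRange 0 (a.length : Int) 1).map
              (fun i => (PySem.List.pyRange 0 (a.length : Int) 1).map (fun j => pvIdx a j i))) i []
          = (PySem.List.pyRange 0 (a.length : Int) 1).map (fun j => pvIdx a j i) := by
      intro i h0i hiN
      exact PySem.List.pyGetD_map_pyRange_of_nonneg _ _ _ _ h0i hiN
    have hcolEq : ∀ i i' : Int, 0 ≤ i → i < (a.length : Int) → 0 ≤ i' → i' < (a.length : Int) →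
        ((PySem.List.pyRange 0 (a.length : Int) 1).map (fun j => pvIdx a j i)
            = (PySem.List.pyRange 0 (a.length : Int) 1).map (fun j => pvIdx a j i')
          ↔ ∀ j : Int, 0 ≤ j → j < (a.length : Int) → pvIdx a j i = pvIdx a j i') := by
      intro i i' _ _ _ _
      rw [List.map_eq_map_iff]
      constructor
      · intro hh j h0j hjN
        exact hh j (PySem.List.mem_pyRange_one.mpr ⟨h0j, hjN⟩)
      · intro hh j hj
        obtain ⟨h0j, hjN⟩ := PySem.List.mem_pyRange_one.mp hj
        exact hh j h0j hjN
    rw [Bool.or_eq_true, List.any_eq_true]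
    constructor
    · rintro (⟨i, hi, hdec⟩ | hdec)
      · obtain ⟨h0i, hiN⟩ := PySem.List.mem_pyRange_one.mp hi
        rw [decide_eq_true_iff, hcol i h0i (by omega), hcol (i + 1) (by omega) (by omega),
          hcolEq i (i + 1) h0i (by omega) (by omega) (by omega)] at hdec
        refine ⟨i.toNat, by omega, ?_⟩
        intro j hj
        unfold pvCmp
        rw [Nat.mod_eq_of_lt (by omega)]
        rw [decide_eq_true_iff]
        have := hdec (j : Int) (by omega) (by omega)
        have hcast : ((i.toNat : Nat) : Int) = i := by omega
        rw [hcast]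
        have hcast2 : ((i.toNat + 1 : Nat) : Int) = i + 1 := by omega
        rw [hcast2]
        exact this
      · rw [decide_eq_true_iff, hcol ((a.length : Int) - 1) (by omega) (by omega),
          hcol 0 (by omega) (by omega),
          hcolEq ((a.length : Int) - 1) 0 (by omega) (by omega) (by omega) (by omega)] at hdec
        refine ⟨a.length - 1, by omega, ?_⟩
        intro j hj
        unfold pvCmp
        rw [Nat.sub_add_cancel h1, Nat.mod_self]
        rw [decide_eq_true_iff]
        have := hdec (j : Int) (by omega) (by omega)
        have hcast : ((a.length - 1 : Nat) : Int) = (a.length : Int) - 1 := by omega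
        rw [hcast]
        exact this
    · rintro ⟨i, hi, hall⟩
      by_cases hlast : i = a.length - 1
      · right
        rw [decide_eq_true_iff, hcol ((a.length : Int) - 1) (by omega) (by omega),
          hcol 0 (by omega) (by omega),
          hcolEq ((a.length : Int) - 1) 0 (by omega) (by omega) (by omega) (by omega)]
        intro j h0j hjN
        have := hall j.toNat (by omega)
        unfold pvCmp at this
        rw [hlast, Nat.sub_add_cancel h1, Nat.mod_self, decide_eq_true_iff] at this
        have hcast : ((a.length - 1 : Nat) : Int) = (a.length : Int) - 1 := by omega
        rw [hcast] at this
        have hcastj : ((j.toNat : Nat) : Int) = j := by omega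
        rw [hcastj] at this
        exact this
      · left
        refine ⟨(i : Int), PySem.List.mem_pyRange_one.mpr ⟨by omega, by omega⟩, ?_⟩
        rw [decide_eq_true_iff, hcol (i : Int) (by omega) (by omega),
          hcol ((i : Int) + 1) (by omega) (by omega),
          hcolEq (i : Int) ((i : Int) + 1) (by omega) (by omega) (by omega) (by omega)]
        intro j h0j hjN
        have := hall j.toNat (by omega)
        unfold pvCmp at this
        rw [Nat.mod_eq_of_lt (by omega), decide_eq_true_iff] at this
        have hcastj : ((j.toNat : Nat) : Int) = j := by omega
        rw [hcastj] at this
        have hcast2 : ((i + 1 : Nat) : Int) = (i : Int) + 1 := by omega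
        rw [hcast2] at this
        exact this

-- ===== VERDICT (by name: the statement is the Claim_ definition above) =====
theorem trungCot_spec : Claim_unchanged_trungCot := by
  unfold Claim_unchanged_trungCot
  intro a _ _
  unfold Spec_trungCot
  intro hnD
  rw [pvD_iff] at hnD
  rcases Nat.eq_zero_or_pos a.length with h0 | h1
  · have ha : a = [] := List.length_eq_zero_iff.mp h0
    subst ha
    decide
  · by_cases hAdj : ∃ i < a.length, ∀ j < a.length, pvCmp a i j = true
    · have hB : trungCot_alt a = true := (trungCot_alt_char a).mpr hAdj
      have hA : trungCot a = true := by
        rw [trungCot_char a h1]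
        obtain ⟨i, hi, hall⟩ := hAdj
        exact (pvIndexRun_iff a.length (pvStream a) h1 (pvStream_length a)).mp
          (pvAdj_indexRun a i hi hall)
      rw [hA, hB]
    · have hB : trungCot_alt a = false := by
        cases hBv : trungCot_alt a
        · rfl
        · exact absurd ((trungCot_alt_char a).mp hBv) hAdj
      have hA : trungCot a = false := by
        cases hAv : trungCot a
        · rfl
        · exfalso
          have hrun := (trungCot_char a h1).mp hAv
          exact hnD ⟨(pvIndexRun_iff a.length (pvStream a) h1 (pvStream_length a)).mpr hrun, hAdj⟩
      rw [hA, hB]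

theorem trungCot_changed : Claim_changed_trungCot := by
  unfold Claim_changed_trungCot; decide

theorem trungCot_tight : Claim_exact_trungCot := by
  unfold Claim_exact_trungCot
  intro a _ _ hD
  rw [pvD_iff] at hD
  obtain ⟨hir, hnAdj⟩ := hD
  have h1 : 1 ≤ a.length := by
    obtain ⟨k, hk, _⟩ := hir
    by_contra hc
    have : a.length = 0 := by omega
    rw [this] at hk
    omega
  have hA : trungCot a = true := by
    rw [trungCot_char a h1]
    exact (pvIndexRun_iff a.length (pvStream a) h1 (pvStream_length a)).mp hir
  have hB : trungCot_alt a = false := by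
    cases hBv : trungCot_alt a
    · rfl
    · exact absurd ((trungCot_alt_char a).mp hBv) hnAdj
  rw [hA, hB]
  simp
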